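-- pv_equiv track=rewrite | github.com/Manuhob/Hackerrank | matrixRotation.py | stripstoMatrix
-- ===== SOURCE A (Python) =====
-- def stripstoMatrix(array):
--     r = 2*len(array)
--     c = len(array[0])//2 + 2 - r
--     matrix = [[0 for _ in range(c)] for _ in range(r)]
-- #    j = 2
--     for j in range(len(array)):
--         strip = array[j]
--         strip1 = strip[0:c-2*j]
--         strip2 = strip[c-2*j:c+r-2*(2*j + 1)]
--         strip3 = strip[c+r-2*(2*j + 1):2*c+r-2*(3*j + 1)][::-1]
--         strip4 = strip[2*c+r-2*(3*j + 1):][::-1]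
--
--         for i in range(j,c-j):
--             matrix[j][i] = strip1[i-j]
--             matrix[r-(j+1)][i] = strip3[i-j]
--         for i in range(j+1,r-(j+1)):
--             matrix[i][c-(j+1)] = strip2[i-(j+1)]
--             matrix[i][j] = strip4[i-(j+1)]
--     return matrix
-- ===== SOURCE B (Python) =====
-- def stripstoMatrix(array):
--     n = len(array)
--     r = 2 * n
--     c = len(array[0]) // 2 + 2 - r
--     matrix = [[0] * c for _ in range(r)]
--     for j in range(n):
--         strip = array[j]
--         k = 0
--         for i in range(j, c - j):          # top row, left to right
--             matrix[j][i] = strip[k]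
--             k += 1
--         for i in range(j + 1, r - j - 1):  # right column, top to bottom
--             matrix[i][c - j - 1] = strip[k]
--             k += 1
--         for i in range(c - j - 1, j - 1, -1):  # bottom row, right to left
--             matrix[r - j - 1][i] = strip[k]
--             k += 1
--         for i in range(r - j - 2, j, -1):  # left column, bottom to top
--             matrix[i][j] = strip[k]
--             k += 1
--     return matrix
-- ===== Notes on version B (the rewrite author's own statement) =====
-- stated objective: simpler
-- what changed: B replaces A's four precomputed slices (two of them reversed) and their offset bookkeeping with a single pointer that consumes each strip sequentially while walking the ring perimeter (top row left-to-right, right column top-to-bottom, bottom row right-to-left, left column bottom-to-top).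
import Mathlib
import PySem

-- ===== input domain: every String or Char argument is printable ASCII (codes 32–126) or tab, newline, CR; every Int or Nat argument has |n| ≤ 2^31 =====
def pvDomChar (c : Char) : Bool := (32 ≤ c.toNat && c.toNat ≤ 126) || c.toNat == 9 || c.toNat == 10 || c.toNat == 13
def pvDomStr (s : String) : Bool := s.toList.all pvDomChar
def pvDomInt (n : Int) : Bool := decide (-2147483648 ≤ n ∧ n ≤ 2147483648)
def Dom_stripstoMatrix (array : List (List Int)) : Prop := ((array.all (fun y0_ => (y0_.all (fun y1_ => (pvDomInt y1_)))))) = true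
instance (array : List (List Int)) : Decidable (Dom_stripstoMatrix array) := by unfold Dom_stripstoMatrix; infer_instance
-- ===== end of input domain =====

-- B replaces A's four precomputed slices (two reversed) with one pointer consuming each strip
-- while walking the ring perimeter; same result on well-formed inputs, simpler bookkeeping.

-- shared helper: Python's `matrix[i][col] = v` (row replacement); exact whenever Python does
-- not raise, i.e. for every in-range (possibly negative) i and col — Pre_ keeps them in range.
def pySetCell (m : List (List Int)) (i col v : Int) : List (List Int) :=
  PySem.List.pySetD m i (PySem.List.pySetD (PySem.List.pyGetD m i []) col v)

-- ===== PORT A =====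
def stripstoMatrix (array : List (List Int)) : List (List Int) :=
  let r : Int := 2 * array.length
  -- array[0]: exact for array ≠ [] (Pre_); Python raises IndexError on []
  let c : Int := PySem.Int.floordiv ((array.headD []).length : Int) 2 + 2 - r
  let matrix : List (List Int) :=
    (PySem.List.pyRange 0 r 1).map (fun _ => (PySem.List.pyRange 0 c 1).map (fun _ => (0 : Int)))
  (PySem.List.pyRange 0 (array.length : Int) 1).foldl (fun matrix j =>
    let strip := PySem.List.pyGetD array j []
    let strip1 := PySem.List.slice strip (some 0) (some (c - 2*j))
    let strip2 := PySem.List.slice strip (some (c - 2*j)) (some (c + r - 2*(2*j + 1)))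
    -- xs[::-1] is List.reverse (PySem.List.slice?_none_none_neg_one)
    let strip3 := (PySem.List.slice strip (some (c + r - 2*(2*j + 1))) (some (2*c + r - 2*(3*j + 1)))).reverse
    let strip4 := (PySem.List.slice strip (some (2*c + r - 2*(3*j + 1))) none).reverse
    let matrix := (PySem.List.pyRange j (c - j) 1).foldl (fun matrix i =>
      let matrix := pySetCell matrix j i (PySem.List.pyGetD strip1 (i - j) 0)
      pySetCell matrix (r - (j + 1)) i (PySem.List.pyGetD strip3 (i - j) 0)) matrix
    (PySem.List.pyRange (j + 1) (r - (j + 1)) 1).foldl (fun matrix i =>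
      let matrix := pySetCell matrix i (c - (j + 1)) (PySem.List.pyGetD strip2 (i - (j + 1)) 0)
      pySetCell matrix i j (PySem.List.pyGetD strip4 (i - (j + 1)) 0)) matrix) matrix

-- ===== PORT B =====
def stripstoMatrix_alt (array : List (List Int)) : List (List Int) :=
  let n : Int := array.length
  let r : Int := 2 * n
  let c : Int := PySem.Int.floordiv ((array.headD []).length : Int) 2 + 2 - r
  let matrix : List (List Int) :=
    (PySem.List.pyRange 0 r 1).map (fun _ => List.replicate c.toNat (0 : Int))
  (PySem.List.pyRange 0 n 1).foldl (fun matrix j =>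
    let strip := PySem.List.pyGetD array j []
    let s : List (List Int) × Int := (matrix, 0)
    let s := (PySem.List.pyRange j (c - j) 1).foldl (fun s i =>
      (pySetCell s.1 j i (PySem.List.pyGetD strip s.2 0), s.2 + 1)) s
    let s := (PySem.List.pyRange (j + 1) (r - j - 1) 1).foldl (fun s i =>
      (pySetCell s.1 i (c - j - 1) (PySem.List.pyGetD strip s.2 0), s.2 + 1)) s
    let s := (PySem.List.pyRange (c - j - 1) (j - 1) (-1)).foldl (fun s i =>
      (pySetCell s.1 (r - j - 1) i (PySem.List.pyGetD strip s.2 0), s.2 + 1)) s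
    let s := (PySem.List.pyRange (r - j - 2) j (-1)).foldl (fun s i =>
      (pySetCell s.1 i j (PySem.List.pyGetD strip s.2 0), s.2 + 1)) s
    s.1) matrix

-- ===== PRECONDITION & SPEC =====
-- dimensions A computes from the input
def pvR (array : List (List Int)) : Int := 2 * array.length
def pvC (array : List (List Int)) : Int :=
  ((array.headD []).length : Int) / 2 + 2 - pvR array
-- Pre_ restricts to the well-formed inputs of the original problem: either a single strip
-- (then A always returns and the ring is the whole 2×c matrix), or several strips with the
-- matrix at least as wide as tall (c ≥ 2·len(array)) and every strip of exactly the perimeter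
-- length of its ring.  Outside it A either raises (IndexError) or its returned value is an
-- accident of slice overrun / negative-index wraparound on surplus or misaligned elements.
def Pre_stripstoMatrix (array : List (List Int)) : Prop :=
  array ≠ [] ∧
  (array.length = 1 ∨
    (2 * (array.length : Int) ≤ pvC array ∧
      ∀ j < array.length,
        ((array.getD j []).length : Int) = 2 * pvC array + 2 * pvR array - 8 * j - 4))
instance (array : List (List Int)) : Decidable (Pre_stripstoMatrix array) := by
  unfold Pre_stripstoMatrix; infer_instance
def pvWitness_stripstoMatrix : List (List Int) := [[1, 2, 3, 4]]
def Spec_stripstoMatrix (array : List (List Int)) (out : List (List Int)) : Prop := out = stripstoMatrix_alt array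
instance (array : List (List Int)) (out : List (List Int)) : Decidable (Spec_stripstoMatrix array out) := by unfold Spec_stripstoMatrix; infer_instance

-- ===== CLAIM (what is proved, stated in full; the proofs are below) =====
def Claim_equal_stripstoMatrix : Prop := ∀ (array : List (List Int)), Dom_stripstoMatrix array → Pre_stripstoMatrix array → Spec_stripstoMatrix array (stripstoMatrix array)

-- ===== LEMMAS AND PROOFS =====

def appW (m : List (List Int)) (p : (Int × Int) × Int) : List (List Int) :=
  pySetCell m p.1.1 p.1.2 p.2

def runW (m : List (List Int)) (ws : List ((Int × Int) × Int)) : List (List Int) :=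
  ws.foldl appW m

theorem runW_append (m : List (List Int)) (a b : List ((Int × Int) × Int)) :
    runW m (a ++ b) = runW (runW m a) b := List.foldl_append

theorem foldl_two_runW (l : List Int) (a1 b1 v1 a2 b2 v2 : Int → Int) (m : List (List Int)) :
    l.foldl (fun m i => pySetCell (pySetCell m (a1 i) (b1 i) (v1 i)) (a2 i) (b2 i) (v2 i)) m
      = runW m (l.flatMap fun i => [((a1 i, b1 i), v1 i), ((a2 i, b2 i), v2 i)]) := by
  induction l generalizing m with
  | nil => rfl
  | cons x t ih => simp [runW, appW, List.foldl_cons, ih]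

theorem interleave_perm {α : Type} (l : List Int) (p q : Int → α) :
    (l.flatMap fun i => [p i, q i]).Perm (l.map p ++ l.map q) := by
  induction l with
  | nil => simp
  | cons x t ih =>
    simp only [List.flatMap_cons, List.map_cons, List.cons_append]
    exact ((ih.cons (q x)).trans List.perm_middle.symm).cons (p x)

theorem counter_foldl {α : Type} (g : α → Int → Int → α) (L : Nat) (f : Nat → Int) (m : α) (k0 : Int) :
    ((List.range L).map f).foldl (fun s i => (g s.1 i s.2, s.2 + 1)) (m, k0)
      = ((List.range L).foldl (fun m t => g m (f t) (k0 + (t : Int))) m, k0 + (L : Int)) := by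
  induction L with
  | zero => simp
  | succ L ih =>
    simp [List.range_succ, List.foldl_append, ih]
    omega

theorem reverse_map_range {α : Type} (L : Nat) (f : Nat → α) :
    ((List.range L).map f).reverse = (List.range L).map (fun t => f (L - 1 - t)) := by
  apply List.ext_getElem
  · simp
  · intro i h1 h2
    simp only [List.getElem_reverse, List.getElem_map, List.getElem_range,
      List.length_map, List.length_range] at *

theorem getD_take_lt (xs : List Int) (n t : Nat) (h : t < n) :
    (xs.take n).getD t 0 = xs.getD t 0 := by
  simp [List.getD_eq_getElem?_getD, h]

theorem getD_drop' (xs : List Int) (n t : Nat) :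
    (xs.drop n).getD t 0 = xs.getD (n + t) 0 := by
  simp [List.getD_eq_getElem?_getD, List.getElem?_drop]

theorem getD_reverse' (xs : List Int) (t : Nat) (h : t < xs.length) :
    xs.reverse.getD t 0 = xs.getD (xs.length - 1 - t) 0 := by
  rw [List.getD_eq_getElem?_getD, List.getD_eq_getElem?_getD, List.getElem?_reverse h]

theorem getD_set_ne' (m : List (List Int)) (i k : Nat) (v : List Int) (h : i ≠ k) :
    (m.set i v).getD k [] = m.getD k [] := by
  simp [List.getD_eq_getElem?_getD, List.getElem?_set_ne h]

def setCellN (m : List (List Int)) (i c : Nat) (v : Int) : List (List Int) :=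
  m.set i ((m.getD i []).set c v)

theorem getD_set_self' (m : List (List Int)) (i : Nat) (v : List Int) (h : i < m.length) :
    (m.set i v).getD i [] = v := by
  simp [List.getD_eq_getElem?_getD, h]

theorem set_oob (m : List (List Int)) (i : Nat) (v : List Int) (h : m.length ≤ i) :
    m.set i v = m := by
  apply List.ext_getElem <;> simp
  intro k h1 h2
  rw [List.getElem_set_ne (by omega)]

theorem appW_eq (m : List (List Int)) (a b v : Int) (ha : 0 ≤ a) (hb : 0 ≤ b) :
    appW m ((a, b), v) = setCellN m a.toNat b.toNat v := by
  simp [appW, pySetCell, setCellN, PySem.List.pySetD_of_nonneg, PySem.List.pyGetD_of_nonneg, ha, hb]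

theorem setCellN_comm (m : List (List Int)) (i1 c1 i2 c2 : Nat) (v1 v2 : Int)
    (hne : (i1, c1) ≠ (i2, c2)) :
    setCellN (setCellN m i1 c1 v1) i2 c2 v2 = setCellN (setCellN m i2 c2 v2) i1 c1 v1 := by
  by_cases hr : i1 = i2
  · subst hr
    have hc : c1 ≠ c2 := by simpa using hne
    by_cases hlen : i1 < m.length
    · simp only [setCellN, getD_set_self' _ _ _ (by simpa using hlen),
        List.set_set]
      rw [List.set_comm _ _ hc]
    · have hl : m.length ≤ i1 := by omega
      simp only [setCellN, set_oob m _ _ hl]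
  · simp only [setCellN, getD_set_ne' _ _ _ _ hr, getD_set_ne' _ _ _ _ (Ne.symm hr)]
    rw [List.set_comm _ _ hr]

theorem appW_comm (x y : (Int × Int) × Int)
    (hx1 : 0 ≤ x.1.1) (hx2 : 0 ≤ x.1.2) (hy1 : 0 ≤ y.1.1) (hy2 : 0 ≤ y.1.2)
    (hne : x.1 ≠ y.1) (m : List (List Int)) :
    appW (appW m x) y = appW (appW m y) x := by
  obtain ⟨⟨a, b⟩, v⟩ := x
  obtain ⟨⟨a', b'⟩, v'⟩ := y
  simp only at hx1 hx2 hy1 hy2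
  rw [appW_eq _ _ _ _ hx1 hx2, appW_eq _ _ _ _ hy1 hy2, appW_eq _ _ _ _ hy1 hy2,
    appW_eq _ _ _ _ hx1 hx2]
  apply setCellN_comm
  simp only [ne_eq, Prod.mk.injEq] at hne ⊢
  omega

theorem runW_perm (ws ws' : List ((Int × Int) × Int)) (h : ws.Perm ws')
    (hpos : ∀ x ∈ ws, 0 ≤ x.1.1 ∧ 0 ≤ x.1.2)
    (hnd : (ws.map Prod.fst).Nodup) (m : List (List Int)) :
    runW m ws = runW m ws' := by
  refine List.Perm.foldl_eq' h ?_ m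
  intro x hx y hy z
  by_cases hxy : x = y
  · subst hxy; rfl
  · have hc : x.1 ≠ y.1 := fun hcc => hxy (List.inj_on_of_nodup_map hnd hx hy hcc)
    exact appW_comm x y (hpos x hx).1 (hpos x hx).2 (hpos y hy).1 (hpos y hy).2 hc z

-- canonical per-ring write lists (cell, value), reading the strip at explicit offsets
def wTop (strip : List Int) (j : Int) (w : Nat) : List ((Int × Int) × Int) :=
  (List.range w).map (fun (t : Nat) => ((j, j + (t : Int)), strip.getD t 0))
def wBot (strip : List Int) (r j : Int) (w h : Nat) : List ((Int × Int) × Int) :=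
  (List.range w).map (fun (t : Nat) => ((r - j - 1, j + (t : Int)), strip.getD (2*w + h - 3 - t) 0))
def wRight (strip : List Int) (c j : Int) (w h : Nat) : List ((Int × Int) × Int) :=
  (List.range (h - 2)).map (fun (t : Nat) => ((j + 1 + (t : Int), c - j - 1), strip.getD (w + t) 0))
def wLeft (strip : List Int) (j : Int) (w h : Nat) : List ((Int × Int) × Int) :=
  (List.range (h - 2)).map (fun (t : Nat) => ((j + 1 + (t : Int), j), strip.getD (2*w + 2*h - 5 - t) 0))

theorem val1 (strip : List Int) (c j : Int) (w : Nat) (hW : c - 2*j = (w : Int))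
    (t : Nat) (ht : t < w) :
    PySem.List.pyGetD (PySem.List.slice strip (some 0) (some (c - 2*j))) (j + (t : Int) - j) 0
      = strip.getD t 0 := by
  rw [hW]
  have e3 : j + (t : Int) - j = ((t : Nat) : Int) := by omega
  rw [e3, PySem.List.pyGetD_natCast, PySem.List.slice_zero_start,
    PySem.List.slice_to_natCast, getD_take_lt _ _ _ ht]

theorem val2 (strip : List Int) (c r j : Int) (w h : Nat)
    (hW : c - 2*j = (w : Int)) (hH : r - 2*j = (h : Int)) (hh : 2 ≤ h)
    (t : Nat) (ht : t < h - 2) :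
    PySem.List.pyGetD (PySem.List.slice strip (some (c - 2*j)) (some (c + r - 2*(2*j + 1))))
      (j + 1 + (t : Int) - (j + 1)) 0 = strip.getD (w + t) 0 := by
  have e2 : c + r - 2*(2*j + 1) = ((w + h - 2 : Nat) : Int) := by omega
  have e3 : j + 1 + (t : Int) - (j + 1) = ((t : Nat) : Int) := by omega
  rw [hW, e2, e3, PySem.List.slice_natCast, PySem.List.pyGetD_natCast]
  have e4 : w + h - 2 - w = h - 2 := by omega
  rw [e4, getD_take_lt _ _ _ ht, getD_drop']

theorem val3 (strip : List Int) (c r j : Int) (w h : Nat)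
    (hW : c - 2*j = (w : Int)) (hH : r - 2*j = (h : Int)) (hh : 2 ≤ h)
    (hge : 2*w + 2*h - 4 ≤ strip.length)
    (t : Nat) (ht : t < w) :
    PySem.List.pyGetD
      ((PySem.List.slice strip (some (c + r - 2*(2*j + 1))) (some (2*c + r - 2*(3*j + 1)))).reverse)
      (j + (t : Int) - j) 0 = strip.getD (2*w + h - 3 - t) 0 := by
  have e2 : c + r - 2*(2*j + 1) = ((w + h - 2 : Nat) : Int) := by omega
  have e4 : 2*c + r - 2*(3*j + 1) = ((2*w + h - 2 : Nat) : Int) := by omega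
  have e3 : j + (t : Int) - j = ((t : Nat) : Int) := by omega
  rw [e2, e4, e3, PySem.List.slice_natCast, PySem.List.pyGetD_natCast]
  have e5 : 2*w + h - 2 - (w + h - 2) = w := by omega
  rw [e5]
  have hlen2 : ((strip.drop (w + h - 2)).take w).length = w := by
    simp; omega
  rw [getD_reverse' _ _ (by rw [hlen2]; exact ht), hlen2,
    getD_take_lt _ _ _ (by omega), getD_drop']
  congr 1
  omega

theorem val4 (strip : List Int) (c r j : Int) (w h : Nat)
    (hW : c - 2*j = (w : Int)) (hH : r - 2*j = (h : Int)) (hh : 2 ≤ h)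
    (hslen : strip.length = 2*w + 2*h - 4)
    (t : Nat) (ht : t < h - 2) :
    PySem.List.pyGetD ((PySem.List.slice strip (some (2*c + r - 2*(3*j + 1))) none).reverse)
      (j + 1 + (t : Int) - (j + 1)) 0 = strip.getD (2*w + 2*h - 5 - t) 0 := by
  have e4 : 2*c + r - 2*(3*j + 1) = ((2*w + h - 2 : Nat) : Int) := by omega
  have e3 : j + 1 + (t : Int) - (j + 1) = ((t : Nat) : Int) := by omega
  rw [e4, e3, PySem.List.slice_from_natCast, PySem.List.pyGetD_natCast]
  have hlen2 : (strip.drop (2*w + h - 2)).length = h - 2 := by simp [hslen]; omega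
  rw [getD_reverse' _ _ (by rw [hlen2]; exact ht), hlen2, getD_drop']
  congr 1
  omega

theorem pos_C (strip : List Int) (r c j : Int) (w h : Nat)
    (hj : 0 ≤ j) (hW : c - 2*j = (w : Int)) (hH : r - 2*j = (h : Int))
    (hwh : 2 ≤ w ∨ h = 2) (hh : 2 ≤ h) :
    ∀ x ∈ (wTop strip j w ++ wBot strip r j w h) ++ (wRight strip c j w h ++ wLeft strip j w h),
      0 ≤ x.1.1 ∧ 0 ≤ x.1.2 := by
  intro x hx
  simp only [wTop, wBot, wRight, wLeft, List.mem_append, List.mem_map, List.mem_range] at hx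
  rcases hwh with hw | hw <;>
    rcases hx with (⟨t, ht, rfl⟩ | ⟨t, ht, rfl⟩) | (⟨t, ht, rfl⟩ | ⟨t, ht, rfl⟩) <;>
    dsimp only <;> constructor <;> omega

theorem nodup_C (strip : List Int) (r c j : Int) (w h : Nat)
    (hW : c - 2*j = (w : Int)) (hH : r - 2*j = (h : Int)) (hwh : 2 ≤ w ∨ h = 2) (hh : 2 ≤ h) :
    (((wTop strip j w ++ wBot strip r j w h) ++ (wRight strip c j w h ++ wLeft strip j w h)).map
      Prod.fst).Nodup := by
  simp only [wTop, wBot, wRight, wLeft, List.map_append, List.map_map]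
  refine List.nodup_append.mpr ⟨List.nodup_append.mpr ⟨?_, ?_, ?_⟩,
    List.nodup_append.mpr ⟨?_, ?_, ?_⟩, ?_⟩
  · refine List.Nodup.map_on ?_ List.nodup_range
    intro x hx y hy hxy
    simp only [Function.comp_apply, Prod.mk.injEq] at hxy
    rcases hwh with hw | hw <;> omega
  · refine List.Nodup.map_on ?_ List.nodup_range
    intro x hx y hy hxy
    simp only [Function.comp_apply, Prod.mk.injEq] at hxy
    rcases hwh with hw | hw <;> omega
  · intro a ha b hb
    simp only [List.mem_map, List.mem_range, Function.comp_apply] at ha hb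
    obtain ⟨t, ht, rfl⟩ := ha
    obtain ⟨t', ht', rfl⟩ := hb
    simp only [ne_eq, Prod.mk.injEq, not_and]
    intro h1
    rcases hwh with hw | hw <;> omega
  · refine List.Nodup.map_on ?_ List.nodup_range
    intro x hx y hy hxy
    simp only [Function.comp_apply, Prod.mk.injEq] at hxy
    rcases hwh with hw | hw <;> omega
  · refine List.Nodup.map_on ?_ List.nodup_range
    intro x hx y hy hxy
    simp only [Function.comp_apply, Prod.mk.injEq] at hxy
    rcases hwh with hw | hw <;> omega
  · intro a ha b hb
    simp only [List.mem_map, List.mem_range, Function.comp_apply] at ha hb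
    obtain ⟨t, ht, rfl⟩ := ha
    obtain ⟨t', ht', rfl⟩ := hb
    simp only [ne_eq, Prod.mk.injEq, not_and]
    intro h1
    rcases hwh with hw | hw <;> omega
  · intro a ha b hb
    simp only [List.mem_append, List.mem_map, List.mem_range, Function.comp_apply] at ha hb
    rcases ha with ⟨t, ht, rfl⟩ | ⟨t, ht, rfl⟩ <;> rcases hb with ⟨t', ht', rfl⟩ | ⟨t', ht', rfl⟩ <;>
      · simp only [ne_eq, Prod.mk.injEq, not_and]
        intro h1
        rcases hwh with hw | hw <;> omega

theorem foldl_cells_runW (L : Nat) (q : Nat → (Int × Int) × Int) (m0 : List (List Int)) :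
    (List.range L).foldl (fun m t => appW m (q t)) m0 = runW m0 ((List.range L).map q) := by
  rw [runW]
  exact List.foldl_map.symm

theorem layer_eq (strip : List Int) (r c j : Int) (w h : Nat)
    (hj : 0 ≤ j) (hW : c - 2*j = (w : Int)) (hH : r - 2*j = (h : Int))
    (hwh : 2 ≤ w ∨ h = 2) (hh : 2 ≤ h)
    (hge : 2*w + 2*h - 4 ≤ strip.length)
    (hex : strip.length = 2*w + 2*h - 4 ∨ h = 2)
    (m : List (List Int)) :
    (PySem.List.pyRange (j + 1) (r - (j + 1)) 1).foldl (fun matrix i =>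
        pySetCell
          (pySetCell matrix i (c - (j + 1))
            (PySem.List.pyGetD (PySem.List.slice strip (some (c - 2*j)) (some (c + r - 2*(2*j + 1)))) (i - (j + 1)) 0))
          i j
          (PySem.List.pyGetD ((PySem.List.slice strip (some (2*c + r - 2*(3*j + 1))) none).reverse) (i - (j + 1)) 0))
      ((PySem.List.pyRange j (c - j) 1).foldl (fun matrix i =>
        pySetCell
          (pySetCell matrix j i
            (PySem.List.pyGetD (PySem.List.slice strip (some 0) (some (c - 2*j))) (i - j) 0))
          (r - (j + 1)) i
          (PySem.List.pyGetD ((PySem.List.slice strip (some (c + r - 2*(2*j + 1))) (some (2*c + r - 2*(3*j + 1)))).reverse) (i - j) 0)) m)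
    =
    ((PySem.List.pyRange (r - j - 2) j (-1)).foldl (fun s i =>
        (pySetCell s.1 i j (PySem.List.pyGetD strip s.2 0), s.2 + 1))
      ((PySem.List.pyRange (c - j - 1) (j - 1) (-1)).foldl (fun s i =>
        (pySetCell s.1 (r - j - 1) i (PySem.List.pyGetD strip s.2 0), s.2 + 1))
        ((PySem.List.pyRange (j + 1) (r - j - 1) 1).foldl (fun s i =>
          (pySetCell s.1 i (c - j - 1) (PySem.List.pyGetD strip s.2 0), s.2 + 1))
          ((PySem.List.pyRange j (c - j) 1).foldl (fun s i =>
            (pySetCell s.1 j i (PySem.List.pyGetD strip s.2 0), s.2 + 1)) (m, 0))))).1 := by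
  -- range normalizations
  have rg1 : PySem.List.pyRange j (c - j) 1 = (List.range w).map (fun (k : Nat) => j + (k : Int)) := by
    rw [PySem.List.pyRange_one]
    have e : (c - j - j).toNat = w := by omega
    rw [e]
  have rg2 : PySem.List.pyRange (j + 1) (r - (j + 1)) 1
      = (List.range (h - 2)).map (fun (k : Nat) => j + 1 + (k : Int)) := by
    rw [PySem.List.pyRange_one]
    have e : (r - (j + 1) - (j + 1)).toNat = h - 2 := by omega
    rw [e]
  have rg2' : PySem.List.pyRange (j + 1) (r - j - 1) 1
      = (List.range (h - 2)).map (fun (k : Nat) => j + 1 + (k : Int)) := by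
    rw [PySem.List.pyRange_one]
    have e : (r - j - 1 - (j + 1)).toNat = h - 2 := by omega
    rw [e]
  have rg3 : PySem.List.pyRange (c - j - 1) (j - 1) (-1)
      = (List.range w).map (fun (k : Nat) => c - j - 1 - (k : Int)) := by
    rw [PySem.List.pyRange_neg_one]
    have e : (c - j - 1 - (j - 1)).toNat = w := by omega
    rw [e]
  have rg4 : PySem.List.pyRange (r - j - 2) j (-1)
      = (List.range (h - 2)).map (fun (k : Nat) => r - j - 2 - (k : Int)) := by
    rw [PySem.List.pyRange_neg_one]
    have e : (r - j - 2 - j).toNat = h - 2 := by omega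
    rw [e]
  rw [rg1, rg2, rg2', rg3, rg4]
  rw [foldl_two_runW, foldl_two_runW]
  -- B side: eliminate the pointer
  have b1 : ∀ m0 : List (List Int),
      List.foldl (fun s i => (pySetCell s.1 j i (PySem.List.pyGetD strip s.2 0), s.2 + 1)) (m0, 0)
        (List.map (fun (k : Nat) => j + (k : Int)) (List.range w))
      = ((List.range w).foldl (fun m0 (t : Nat) => pySetCell m0 j (j + (t : Int)) (PySem.List.pyGetD strip (0 + (t : Int)) 0)) m0, 0 + (w : Int)) :=
    fun m0 => counter_foldl (fun m0 i k => pySetCell m0 j i (PySem.List.pyGetD strip k 0)) w _ m0 0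
  have b2 : ∀ m0 : List (List Int),
      List.foldl (fun s i => (pySetCell s.1 i (c - j - 1) (PySem.List.pyGetD strip s.2 0), s.2 + 1)) (m0, 0 + (w : Int))
        (List.map (fun (k : Nat) => j + 1 + (k : Int)) (List.range (h - 2)))
      = ((List.range (h - 2)).foldl (fun m0 (t : Nat) => pySetCell m0 (j + 1 + (t : Int)) (c - j - 1) (PySem.List.pyGetD strip (0 + (w : Int) + (t : Int)) 0)) m0, 0 + (w : Int) + ((h - 2 : Nat) : Int)) :=
    fun m0 => counter_foldl (fun m0 i k => pySetCell m0 i (c - j - 1) (PySem.List.pyGetD strip k 0)) (h - 2) _ m0 (0 + (w : Int))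
  have b3 : ∀ m0 : List (List Int),
      List.foldl (fun s i => (pySetCell s.1 (r - j - 1) i (PySem.List.pyGetD strip s.2 0), s.2 + 1)) (m0, 0 + (w : Int) + ((h - 2 : Nat) : Int))
        (List.map (fun (k : Nat) => c - j - 1 - (k : Int)) (List.range w))
      = ((List.range w).foldl (fun m0 (t : Nat) => pySetCell m0 (r - j - 1) (c - j - 1 - (t : Int)) (PySem.List.pyGetD strip (0 + (w : Int) + ((h - 2 : Nat) : Int) + (t : Int)) 0)) m0, 0 + (w : Int) + ((h - 2 : Nat) : Int) + (w : Int)) :=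
    fun m0 => counter_foldl (fun m0 i k => pySetCell m0 (r - j - 1) i (PySem.List.pyGetD strip k 0)) w _ m0 _
  have b4 : ∀ m0 : List (List Int),
      List.foldl (fun s i => (pySetCell s.1 i j (PySem.List.pyGetD strip s.2 0), s.2 + 1)) (m0, 0 + (w : Int) + ((h - 2 : Nat) : Int) + (w : Int))
        (List.map (fun (k : Nat) => r - j - 2 - (k : Int)) (List.range (h - 2)))
      = ((List.range (h - 2)).foldl (fun m0 (t : Nat) => pySetCell m0 (r - j - 2 - (t : Int)) j (PySem.List.pyGetD strip (0 + (w : Int) + ((h - 2 : Nat) : Int) + (w : Int) + (t : Int)) 0)) m0, 0 + (w : Int) + ((h - 2 : Nat) : Int) + (w : Int) + ((h - 2 : Nat) : Int)) :=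
    fun m0 => counter_foldl (fun m0 i k => pySetCell m0 i j (PySem.List.pyGetD strip k 0)) (h - 2) _ m0 _
  rw [b1, b2, b3, b4]
  -- B side loops as runW over canonical write lists
  have c1 : ∀ m0 : List (List Int),
      List.foldl (fun m0 (t : Nat) => pySetCell m0 j (j + (t : Int)) (PySem.List.pyGetD strip (0 + (t : Int)) 0)) m0 (List.range w)
        = runW m0 (wTop strip j w) := by
    have e : (List.range w).map (fun (t : Nat) => ((j, j + (t : Int)), PySem.List.pyGetD strip (0 + (t : Int)) 0)) = wTop strip j w := by
      simp only [wTop]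
      apply List.map_congr_left
      intro t ht
      rw [show (0 : Int) + (t : Int) = ((t : Nat) : Int) from by omega, PySem.List.pyGetD_natCast]
    intro m0
    rw [← e]
    exact foldl_cells_runW w (fun (t : Nat) => ((j, j + (t : Int)), PySem.List.pyGetD strip (0 + (t : Int)) 0)) m0
  have c2 : ∀ m0 : List (List Int),
      List.foldl (fun m0 (t : Nat) => pySetCell m0 (j + 1 + (t : Int)) (c - j - 1) (PySem.List.pyGetD strip (0 + (w : Int) + (t : Int)) 0)) m0 (List.range (h - 2))
        = runW m0 (wRight strip c j w h) := by
    have e : (List.range (h - 2)).map (fun (t : Nat) => ((j + 1 + (t : Int), c - j - 1), PySem.List.pyGetD strip (0 + (w : Int) + (t : Int)) 0)) = wRight strip c j w h := by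
      simp only [wRight]
      apply List.map_congr_left
      intro t ht
      rw [show (0 : Int) + (w : Int) + (t : Int) = ((w + t : Nat) : Int) from by omega, PySem.List.pyGetD_natCast]
    intro m0
    rw [← e]
    exact foldl_cells_runW (h - 2) (fun (t : Nat) => ((j + 1 + (t : Int), c - j - 1), PySem.List.pyGetD strip (0 + (w : Int) + (t : Int)) 0)) m0
  have c3 : ∀ m0 : List (List Int),
      List.foldl (fun m0 (t : Nat) => pySetCell m0 (r - j - 1) (c - j - 1 - (t : Int)) (PySem.List.pyGetD strip (0 + (w : Int) + ((h - 2 : Nat) : Int) + (t : Int)) 0)) m0 (List.range w)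
        = runW m0 ((wBot strip r j w h).reverse) := by
    have e : (List.range w).map (fun (t : Nat) => ((r - j - 1, c - j - 1 - (t : Int)), PySem.List.pyGetD strip (0 + (w : Int) + ((h - 2 : Nat) : Int) + (t : Int)) 0)) = (wBot strip r j w h).reverse := by
      simp only [wBot]
      rw [reverse_map_range]
      apply List.map_congr_left
      intro t ht
      rw [List.mem_range] at ht
      rw [show (0 : Int) + (w : Int) + ((h - 2 : Nat) : Int) + (t : Int) = ((w + h - 2 + t : Nat) : Int) by omega]
      rw [show 2*w + h - 3 - (w - 1 - t) = w + h - 2 + t by omega]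
      simp only [Prod.mk.injEq, PySem.List.pyGetD_natCast]
      exact ⟨⟨trivial, by omega⟩, trivial⟩
    intro m0
    rw [← e]
    exact foldl_cells_runW w (fun (t : Nat) => ((r - j - 1, c - j - 1 - (t : Int)), PySem.List.pyGetD strip (0 + (w : Int) + ((h - 2 : Nat) : Int) + (t : Int)) 0)) m0
  have c4 : ∀ m0 : List (List Int),
      List.foldl (fun m0 (t : Nat) => pySetCell m0 (r - j - 2 - (t : Int)) j (PySem.List.pyGetD strip (0 + (w : Int) + ((h - 2 : Nat) : Int) + (w : Int) + (t : Int)) 0)) m0 (List.range (h - 2))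
        = runW m0 ((wLeft strip j w h).reverse) := by
    have e : (List.range (h - 2)).map (fun (t : Nat) => ((r - j - 2 - (t : Int), j), PySem.List.pyGetD strip (0 + (w : Int) + ((h - 2 : Nat) : Int) + (w : Int) + (t : Int)) 0)) = (wLeft strip j w h).reverse := by
      simp only [wLeft]
      rw [reverse_map_range]
      apply List.map_congr_left
      intro t ht
      rw [List.mem_range] at ht
      rw [show (0 : Int) + (w : Int) + ((h - 2 : Nat) : Int) + (w : Int) + (t : Int) = ((2*w + h - 2 + t : Nat) : Int) by omega]
      rw [show 2*w + 2*h - 5 - (h - 2 - 1 - t) = 2*w + h - 2 + t by omega]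
      simp only [Prod.mk.injEq, PySem.List.pyGetD_natCast]
      exact ⟨⟨by omega, trivial⟩, trivial⟩
    intro m0
    rw [← e]
    exact foldl_cells_runW (h - 2) (fun (t : Nat) => ((r - j - 2 - (t : Int), j), PySem.List.pyGetD strip (0 + (w : Int) + ((h - 2 : Nat) : Int) + (w : Int) + (t : Int)) 0)) m0
  rw [c1, c2, c3, c4]
  -- A side flatMaps are permutations of the canonical lists
  have a1eq : (List.range w).map ((fun i : Int => ((j, i), PySem.List.pyGetD (PySem.List.slice strip (some 0) (some (c - 2*j))) (i - j) 0)) ∘ fun (k : Nat) => j + (k : Int)) = wTop strip j w := by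
    simp only [wTop]
    apply List.map_congr_left
    intro t ht
    rw [List.mem_range] at ht
    simp only [Function.comp_apply, Prod.mk.injEq]
    exact ⟨trivial, val1 strip c j w hW t ht⟩
  have a3eq : (List.range w).map ((fun i : Int => ((r - (j + 1), i), PySem.List.pyGetD ((PySem.List.slice strip (some (c + r - 2*(2*j + 1))) (some (2*c + r - 2*(3*j + 1)))).reverse) (i - j) 0)) ∘ fun (k : Nat) => j + (k : Int)) = wBot strip r j w h := by
    simp only [wBot]
    apply List.map_congr_left
    intro t ht
    rw [List.mem_range] at ht
    simp only [Function.comp_apply, Prod.mk.injEq]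
    exact ⟨⟨by ring, trivial⟩, val3 strip c r j w h hW hH hh hge t ht⟩
  have a2eq : (List.range (h - 2)).map ((fun i : Int => ((i, c - (j + 1)), PySem.List.pyGetD (PySem.List.slice strip (some (c - 2*j)) (some (c + r - 2*(2*j + 1)))) (i - (j + 1)) 0)) ∘ fun (k : Nat) => j + 1 + (k : Int)) = wRight strip c j w h := by
    simp only [wRight]
    apply List.map_congr_left
    intro t ht
    rw [List.mem_range] at ht
    simp only [Function.comp_apply, Prod.mk.injEq]
    exact ⟨⟨trivial, by ring⟩, val2 strip c r j w h hW hH hh t ht⟩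
  have a4eq : (List.range (h - 2)).map ((fun i : Int => ((i, j), PySem.List.pyGetD ((PySem.List.slice strip (some (2*c + r - 2*(3*j + 1))) none).reverse) (i - (j + 1)) 0)) ∘ fun (k : Nat) => j + 1 + (k : Int)) = wLeft strip j w h := by
    simp only [wLeft]
    apply List.map_congr_left
    intro t ht
    rw [List.mem_range] at ht
    simp only [Function.comp_apply, Prod.mk.injEq]
    rcases hex with hslen | hh2
    · exact ⟨trivial, val4 strip c r j w h hW hH hh hslen t ht⟩
    · exact absurd ht (by omega)
  have pA1 : (List.flatMap
      (fun i => [((j, i), PySem.List.pyGetD (PySem.List.slice strip (some 0) (some (c - 2*j))) (i - j) 0),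
        ((r - (j + 1), i), PySem.List.pyGetD ((PySem.List.slice strip (some (c + r - 2*(2*j + 1))) (some (2*c + r - 2*(3*j + 1)))).reverse) (i - j) 0)])
      (List.map (fun (k : Nat) => j + (k : Int)) (List.range w))).Perm
      (wTop strip j w ++ wBot strip r j w h) := by
    refine (interleave_perm _ _ _).trans ?_
    rw [List.map_map, List.map_map, a1eq, a3eq]
  have pA2 : (List.flatMap
      (fun i => [((i, c - (j + 1)), PySem.List.pyGetD (PySem.List.slice strip (some (c - 2*j)) (some (c + r - 2*(2*j + 1)))) (i - (j + 1)) 0),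
        ((i, j), PySem.List.pyGetD ((PySem.List.slice strip (some (2*c + r - 2*(3*j + 1))) none).reverse) (i - (j + 1)) 0)])
      (List.map (fun (k : Nat) => j + 1 + (k : Int)) (List.range (h - 2)))).Perm
      (wRight strip c j w h ++ wLeft strip j w h) := by
    refine (interleave_perm _ _ _).trans ?_
    rw [List.map_map, List.map_map, a2eq, a4eq]
  rw [← runW_append, ← runW_append, ← runW_append, ← runW_append]
  have pB : (wTop strip j w ++ (wRight strip c j w h ++ ((wBot strip r j w h).reverse ++ (wLeft strip j w h).reverse))).Perm
      ((wTop strip j w ++ wBot strip r j w h) ++ (wRight strip c j w h ++ wLeft strip j w h)) := by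
    refine (List.Perm.append_left _ (List.Perm.append_left _
      (List.Perm.append ((wBot strip r j w h).reverse_perm) ((wLeft strip j w h).reverse_perm)))).trans ?_
    rw [show (wTop strip j w ++ wBot strip r j w h) ++ (wRight strip c j w h ++ wLeft strip j w h)
        = wTop strip j w ++ (wBot strip r j w h ++ (wRight strip c j w h ++ wLeft strip j w h)) from
      List.append_assoc _ _ _]
    refine List.Perm.append_left _ ?_
    rw [← List.append_assoc, ← List.append_assoc]
    exact List.perm_append_comm.append_right _
  have hpos := pos_C strip r c j w h hj hW hH hwh hh
  have hnd := nodup_C strip r c j w h hW hH hwh hh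
  rw [← runW_perm _ _ ((pA1.append pA2).symm) hpos hnd m,
    ← runW_perm _ _ pB.symm hpos hnd m]

-- ===== VERDICT (by name: the statement is the Claim_ definition above) =====
theorem stripstoMatrix_spec : Claim_equal_stripstoMatrix := by
  unfold Claim_equal_stripstoMatrix
  intro array hdom hpre
  unfold Spec_stripstoMatrix
  obtain ⟨hne, hcase⟩ := hpre
  have hn : 0 < array.length := by
    cases array with
    | nil => exact absurd rfl hne
    | cons a t => simp
  simp only [stripstoMatrix, stripstoMatrix_alt]
  have hrow : (PySem.List.pyRange 0 (PySem.Int.floordiv ((array.headD []).length : Int) 2 + 2 - 2 * (array.length : Int)) 1).map (fun _ => (0 : Int))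
      = List.replicate (PySem.Int.floordiv ((array.headD []).length : Int) 2 + 2 - 2 * (array.length : Int)).toNat (0 : Int) := by
    rw [List.map_const', PySem.List.length_pyRange_one, sub_zero]
  rw [hrow]
  apply PySem.List.foldl_congr_mem
  intro acc j hj
  rw [PySem.List.mem_pyRange_one] at hj
  have hfd : PySem.Int.floordiv ((array.headD []).length : Int) 2 = ((array.headD []).length : Int) / 2 :=
    PySem.Int.floordiv_eq_ediv_of_pos (by omega)
  have hcv : pvC array = PySem.Int.floordiv ((array.headD []).length : Int) 2 + 2 - 2 * (array.length : Int) := by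
    rw [pvC, pvR, hfd]
  set c : Int := PySem.Int.floordiv ((array.headD []).length : Int) 2 + 2 - 2 * (array.length : Int) with hcdef
  set r : Int := 2 * (array.length : Int) with hrdef
  have hjn : j.toNat < array.length := by omega
  have hH : r - 2 * j = (((r - 2 * j).toNat : Nat) : Int) := by omega
  have hh2 : 2 ≤ (r - 2 * j).toNat := by omega
  rcases hcase with h1 | ⟨hc, hlen⟩
  · -- a single strip: j = 0, the ring is the whole 2×c matrix, any strip length works
    have hj0 : j = 0 := by omega
    have hL : 0 ≤ ((array.headD []).length : Int) / 2 := Int.ediv_nonneg (by omega) (by omega)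
    have hW : c - 2 * j = (((c - 2 * j).toNat : Nat) : Int) := by omega
    have hstrip : PySem.List.pyGetD array j ([] : List Int) = array.getD j.toNat [] :=
      PySem.List.pyGetD_of_nonneg array [] (by omega)
    have hhead : array.getD j.toNat [] = array.headD [] := by
      rw [hj0]
      cases array with
      | nil => rfl
      | cons a t => rfl
    have hdiv : 2 * (((array.headD []).length : Int) / 2) ≤ ((array.headD []).length : Int) := by
      omega
    have hht : (r - 2 * j).toNat = 2 := by omega
    have hge : 2 * (c - 2 * j).toNat + 2 * (r - 2 * j).toNat - 4
        ≤ (PySem.List.pyGetD array j ([] : List Int)).length := by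
      rw [hstrip, hhead]
      omega
    exact layer_eq (PySem.List.pyGetD array j []) r c j (c - 2 * j).toNat (r - 2 * j).toNat
      (by omega) hW hH (Or.inr hht) hh2 hge (Or.inr hht) acc
  · have hlenj := hlen j.toNat hjn
    rw [hcv] at hc hlenj
    have hW : c - 2 * j = (((c - 2 * j).toNat : Nat) : Int) := by omega
    have hstrip : PySem.List.pyGetD array j ([] : List Int) = array.getD j.toNat [] :=
      PySem.List.pyGetD_of_nonneg array [] (by omega)
    have hslen : (PySem.List.pyGetD array j ([] : List Int)).length
        = 2 * (c - 2 * j).toNat + 2 * (r - 2 * j).toNat - 4 := by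
      rw [hstrip]
      have hpvr : pvR array = r := by rw [pvR]
      rw [hpvr] at hlenj
      omega
    exact layer_eq (PySem.List.pyGetD array j []) r c j (c - 2 * j).toNat (r - 2 * j).toNat
      (by omega) hW hH (Or.inl (by omega)) hh2 (by omega) (Or.inl hslen) acc
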